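-- pv_equiv track=rewrite | github.com/gamarino/protoPython | benchmarks/attr_lookup.py | run_bench
-- ===== SOURCE A (Python) =====
-- class FastObject:
--     def __init__(self, a, b, c):
--         self.a = a
--         self.b = b
--         self.c = c
--
-- def run_bench(n=100000):
--     obj = FastObject(1, 2, 3)
--     total = 0
--     for _ in range(n):
--         total += obj.a
--         total += obj.b
--         total += obj.c
--     return total
-- ===== SOURCE B (Python) =====
-- def run_bench(n=100000):
--     # closed form: each iteration adds a+b+c = 6; no iterations for n <= 0
--     return 6 * max(n, 0)
-- ===== Notes on version B (the rewrite author's own statement) =====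
-- stated objective: faster
-- what changed: Replaced the n-iteration attribute-summing loop by the closed form 6*max(n,0).
import Mathlib
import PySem

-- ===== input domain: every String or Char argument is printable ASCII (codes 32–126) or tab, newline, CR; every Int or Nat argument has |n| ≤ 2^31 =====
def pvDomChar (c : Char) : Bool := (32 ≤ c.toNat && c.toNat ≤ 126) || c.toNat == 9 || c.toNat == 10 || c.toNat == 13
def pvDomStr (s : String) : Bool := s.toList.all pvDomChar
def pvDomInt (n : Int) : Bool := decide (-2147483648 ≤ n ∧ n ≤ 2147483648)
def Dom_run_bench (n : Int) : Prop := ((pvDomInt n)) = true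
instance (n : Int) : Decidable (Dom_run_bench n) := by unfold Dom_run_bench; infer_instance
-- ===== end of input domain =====

-- B replaces A's n-iteration loop by the closed form 6*max(n,0): asymptotically faster (O(1) vs O(n)).

-- ===== PORT A =====
-- obj.a/obj.b/obj.c are the constants 1, 2, 3 set in FastObject.__init__
def run_bench (n : Int) : Int :=
  (PySem.List.pyRange 0 n 1).foldl (fun total _ => total + 1 + 2 + 3) 0

-- ===== PORT B =====
def run_bench_alt (n : Int) : Int := 6 * max n 0

-- ===== PRECONDITION & SPEC =====
def Spec_run_bench (n : Int) (out : Int) : Prop := out = run_bench_alt n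
instance (n : Int) (out : Int) : Decidable (Spec_run_bench n out) := by unfold Spec_run_bench; infer_instance

-- ===== CLAIM (what is proved, stated in full; the proofs are below) =====
def Claim_equal_run_bench : Prop := ∀ (n : Int), Dom_run_bench n → Spec_run_bench n (run_bench n)

-- ===== LEMMAS AND PROOFS =====
theorem pv_foldl_const6 (l : List Int) (acc : Int) :
    l.foldl (fun total _ => total + 1 + 2 + 3) acc = acc + 6 * l.length := by
  induction l generalizing acc with
  | nil => simp
  | cons x xs ih => simp [List.foldl, ih]; ring

-- ===== VERDICT (by name: the statement is the Claim_ definition above) =====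
theorem run_bench_spec : Claim_equal_run_bench := by
  intro n _
  unfold Spec_run_bench run_bench run_bench_alt
  rw [pv_foldl_const6]
  rw [PySem.List.length_pyRange_one]
  omega
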